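-- pv_equiv track=rewrite | github.com/noelgit/agent-s3 | agent_s3/pre_planner_json_validator.py | generate_repair_suggestions
-- ===== SOURCE A (Python) =====
-- from typing import Any, Dict, List, Tuple
--
-- def generate_repair_suggestions(
--
--     data: Dict[str, Any],
--     errors: List[str],
-- ) -> Dict[str, Any]:
--     """
--     Generate repair suggestions for validation issues.
--
--     Args:
--         data: The pre-planning data with issues
--         errors: List of validation error messages
--
--     Returns:
--         Dictionary with repair suggestions organized by category
--     """
--     repair_suggestions = {
--         "schema_structure": [],
--         "reference_integrity": [],
--         "content_safety": [],
--         "coverage_gaps": [],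
--         "technical_feasibility": []
--     }
--
--     # Categorize errors and generate specific repair suggestions
--     for error in errors:
--         if any(kw in error.lower() for kw in ["missing", "required field", "must be an array", "must contain at least"]):
--             repair_suggestions["schema_structure"].append({
--                 "error": error,
--                 "suggestion": f"Add the missing field mentioned in the error: {error}"
--             })
--         elif any(kw in error.lower() for kw in ["references non-existent", "depends on", "orphaned test"]):
--             repair_suggestions["reference_integrity"].append({
--                 "error": error,
--                 "suggestion": f"Fix the reference mentioned in the error: {error}"
--             })
--         elif any(kw in error.lower() for kw in ["dangerous operation", "security-related"]):
--             repair_suggestions["content_safety"].append({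
--                 "error": error,
--                 "suggestion": f"Remove or replace the dangerous operation or add proper security measures: {error}"
--             })
--         elif "lacks" in error.lower():
--             repair_suggestions["coverage_gaps"].append({
--                 "error": error,
--                 "suggestion": f"Add the missing test or assessment: {error}"
--             })
--         elif any(kw in error.lower() for kw in ["complexity level", "implementation steps"]):
--             repair_suggestions["technical_feasibility"].append({
--                 "error": error,
--                 "suggestion": f"Adjust the complexity level or implementation steps: {error}"
--             })
--
--     # Remove empty categories
--     return {k: v for k, v in repair_suggestions.items() if v}
-- ===== SOURCE B (Python) =====
-- from typing import Any, Dict, List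
--
-- _TABLE = [
--     ("schema_structure",
--      ["missing", "required field", "must be an array", "must contain at least"],
--      "Add the missing field mentioned in the error: "),
--     ("reference_integrity",
--      ["references non-existent", "depends on", "orphaned test"],
--      "Fix the reference mentioned in the error: "),
--     ("content_safety",
--      ["dangerous operation", "security-related"],
--      "Remove or replace the dangerous operation or add proper security measures: "),
--     ("coverage_gaps",
--      ["lacks"],
--      "Add the missing test or assessment: "),
--     ("technical_feasibility",
--      ["complexity level", "implementation steps"],
--      "Adjust the complexity level or implementation steps: "),
-- ]
--
--
-- def _category(error: str) -> int:
--     low = error.lower()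
--     for i, (_, keywords, _) in enumerate(_TABLE):
--         if any(kw in low for kw in keywords):
--             return i
--     return -1
--
--
-- def generate_repair_suggestions(data: Dict[str, Any], errors: List[str]) -> Dict[str, Any]:
--     cats = [_category(e) for e in errors]
--     pairs = list(zip(errors, cats))
--     result = {}
--     for i, (name, _, prefix) in enumerate(_TABLE):
--         matched = [{"error": e, "suggestion": prefix + e} for e, c in pairs if c == i]
--         if matched:
--             result[name] = matched
--     return result
-- ===== Notes on version B (the rewrite author's own statement) =====
-- stated objective: idiomatic
-- what changed: Replaces the per-error if/elif ladder with append-to-five-accumulators by a data-driven keyword table: each error is classified once to a category index, then the result is assembled per category by filtering the classified pairs.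
import Mathlib
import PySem

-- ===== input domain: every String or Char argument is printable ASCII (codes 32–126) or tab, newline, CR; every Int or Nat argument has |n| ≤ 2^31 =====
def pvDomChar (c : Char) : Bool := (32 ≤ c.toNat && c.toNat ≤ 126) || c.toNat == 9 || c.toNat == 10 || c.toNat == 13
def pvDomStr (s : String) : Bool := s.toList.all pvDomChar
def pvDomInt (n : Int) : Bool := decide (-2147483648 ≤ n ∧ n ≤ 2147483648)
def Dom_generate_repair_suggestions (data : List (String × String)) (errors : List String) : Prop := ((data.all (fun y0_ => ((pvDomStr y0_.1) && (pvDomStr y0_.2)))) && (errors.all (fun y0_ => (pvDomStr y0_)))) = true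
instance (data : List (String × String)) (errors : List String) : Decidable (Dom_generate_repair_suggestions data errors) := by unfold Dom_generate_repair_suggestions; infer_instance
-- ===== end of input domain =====

-- B replaces A's per-error if/elif ladder over five accumulators by a keyword table:
-- classify each error once, then assemble the result per category (idiomatic; same cost).

-- ===== PORT A =====
-- state: the five category lists in dict-insertion order
abbrev PvSt := List (List (String × String)) × List (List (String × String)) ×
  List (List (String × String)) × List (List (String × String)) × List (List (String × String))

def pvStepA (st : PvSt) (error : String) : PvSt :=
  let low := PySem.Str.lower error
  let (ss, ri, cs, cg, tf) := st
  if ["missing", "required field", "must be an array", "must contain at least"].any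
      (fun kw => PySem.Str.isIn kw low) then
    (ss ++ [[("error", error), ("suggestion", "Add the missing field mentioned in the error: " ++ error)]], ri, cs, cg, tf)
  else if ["references non-existent", "depends on", "orphaned test"].any
      (fun kw => PySem.Str.isIn kw low) then
    (ss, ri ++ [[("error", error), ("suggestion", "Fix the reference mentioned in the error: " ++ error)]], cs, cg, tf)
  else if ["dangerous operation", "security-related"].any
      (fun kw => PySem.Str.isIn kw low) then
    (ss, ri, cs ++ [[("error", error), ("suggestion", "Remove or replace the dangerous operation or add proper security measures: " ++ error)]], cg, tf)
  else if PySem.Str.isIn "lacks" low then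
    (ss, ri, cs, cg ++ [[("error", error), ("suggestion", "Add the missing test or assessment: " ++ error)]], tf)
  else if ["complexity level", "implementation steps"].any
      (fun kw => PySem.Str.isIn kw low) then
    (ss, ri, cs, cg, tf ++ [[("error", error), ("suggestion", "Adjust the complexity level or implementation steps: " ++ error)]])
  else
    (ss, ri, cs, cg, tf)

def generate_repair_suggestions (data : List (String × String)) (errors : List String) :
    List (String × List (List (String × String))) :=
  let st := errors.foldl pvStepA ([], [], [], [], [])
  let (ss, ri, cs, cg, tf) := st
  ([("schema_structure", ss), ("reference_integrity", ri), ("content_safety", cs),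
    ("coverage_gaps", cg), ("technical_feasibility", tf)] :
      List (String × List (List (String × String)))).filter (fun p => !p.2.isEmpty)

-- ===== PORT B =====
def pvTable : List (String × List String × String) :=
  [("schema_structure",
    ["missing", "required field", "must be an array", "must contain at least"],
    "Add the missing field mentioned in the error: "),
   ("reference_integrity",
    ["references non-existent", "depends on", "orphaned test"],
    "Fix the reference mentioned in the error: "),
   ("content_safety",
    ["dangerous operation", "security-related"],
    "Remove or replace the dangerous operation or add proper security measures: "),
   ("coverage_gaps",
    ["lacks"],
    "Add the missing test or assessment: "),
   ("technical_feasibility",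
    ["complexity level", "implementation steps"],
    "Adjust the complexity level or implementation steps: ")]

def pvCategoryGo (low : String) (i : Int) : List (String × List String × String) → Int
  | [] => -1
  | t :: ts => if t.2.1.any (fun kw => PySem.Str.isIn kw low) then i else pvCategoryGo low (i + 1) ts

def pvCategory (error : String) : Int := pvCategoryGo (PySem.Str.lower error) 0 pvTable

def generate_repair_suggestions_alt (data : List (String × String)) (errors : List String) :
    List (String × List (List (String × String))) :=
  let cats := errors.map pvCategory
  let pairs := errors.zip cats
  (PySem.List.enumerate pvTable).foldl
    (fun acc it =>
      let matched := (pairs.filter (fun p => p.2 == it.1)).map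
        (fun p => [("error", p.1), ("suggestion", it.2.2.2 ++ p.1)])
      if !matched.isEmpty then acc ++ [(it.2.1, matched)] else acc)
    []

-- ===== PRECONDITION & SPEC =====
def Spec_generate_repair_suggestions (data : List (String × String)) (errors : List String) (out : List (String × List (List (String × String)))) : Prop := out = generate_repair_suggestions_alt data errors
instance (data : List (String × String)) (errors : List String) (out : List (String × List (List (String × String)))) : Decidable (Spec_generate_repair_suggestions data errors out) := by unfold Spec_generate_repair_suggestions; infer_instance

-- ===== CLAIM (what is proved, stated in full; the proofs are below) =====
def Claim_equal_generate_repair_suggestions : Prop := ∀ (data : List (String × String)) (errors : List String), Dom_generate_repair_suggestions data errors → Spec_generate_repair_suggestions data errors (generate_repair_suggestions data errors)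

-- ===== LEMMAS AND PROOFS =====

-- the per-category selection B computes, phrased on the raw error list
def pvSel (i : Int) (pre : String) (errors : List String) : List (List (String × String)) :=
  (errors.filter (fun e => pvCategory e == i)).map
    (fun e => [("error", e), ("suggestion", pre ++ e)])

lemma pvStepA_eq (st : PvSt) (e : String) :
    pvStepA st e =
      (st.1 ++ pvSel 0 "Add the missing field mentioned in the error: " [e],
       st.2.1 ++ pvSel 1 "Fix the reference mentioned in the error: " [e],
       st.2.2.1 ++ pvSel 2 "Remove or replace the dangerous operation or add proper security measures: " [e],
       st.2.2.2.1 ++ pvSel 3 "Add the missing test or assessment: " [e],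
       st.2.2.2.2 ++ pvSel 4 "Adjust the complexity level or implementation steps: " [e]) := by
  obtain ⟨ss, ri, cs, cg, tf⟩ := st
  simp only [pvStepA, pvSel, pvCategory, pvTable, pvCategoryGo, List.filter,
    List.any_cons, List.any_nil, Bool.or_false]
  split_ifs <;> simp_all [List.isEmpty_iff]

lemma pvFoldA (errors : List String) (ss ri cs cg tf : List (List (String × String))) :
    errors.foldl pvStepA (ss, ri, cs, cg, tf) =
      (ss ++ pvSel 0 "Add the missing field mentioned in the error: " errors,
       ri ++ pvSel 1 "Fix the reference mentioned in the error: " errors,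
       cs ++ pvSel 2 "Remove or replace the dangerous operation or add proper security measures: " errors,
       cg ++ pvSel 3 "Add the missing test or assessment: " errors,
       tf ++ pvSel 4 "Adjust the complexity level or implementation steps: " errors) := by
  induction errors generalizing ss ri cs cg tf with
  | nil => simp [pvSel]
  | cons e es ih =>
    rw [List.foldl_cons, pvStepA_eq, ih]
    simp only [pvSel, List.filter_cons, List.filter_nil]
    split_ifs <;> simp

lemma pvZipFilter (i : Int) (pre : String) (errors : List String) :
    ((errors.zip (errors.map pvCategory)).filter (fun p => p.2 == i)).map
        (fun p => [("error", p.1), ("suggestion", pre ++ p.1)]) =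
      pvSel i pre errors := by
  induction errors with
  | nil => simp [pvSel]
  | cons e es ih =>
    simp only [List.zip_cons_cons, List.filter_cons, pvSel, List.map] at *
    split_ifs <;> simp_all

-- ===== VERDICT (by name: the statement is the Claim_ definition above) =====
theorem generate_repair_suggestions_spec : Claim_equal_generate_repair_suggestions := by
  intro data errors _
  show _ = _
  show generate_repair_suggestions data errors = generate_repair_suggestions_alt data errors
  unfold generate_repair_suggestions generate_repair_suggestions_alt
  rw [pvFoldA]
  simp only [pvTable, PySem.List.enumerate_cons, PySem.List.enumerate_nil, List.foldl_cons,
    List.foldl_nil, pvZipFilter]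
  norm_num
  cases h0 : (pvSel 0 "Add the missing field mentioned in the error: " errors).isEmpty <;>
  cases h1 : (pvSel 1 "Fix the reference mentioned in the error: " errors).isEmpty <;>
  cases h2 : (pvSel 2 "Remove or replace the dangerous operation or add proper security measures: " errors).isEmpty <;>
  cases h3 : (pvSel 3 "Add the missing test or assessment: " errors).isEmpty <;>
  cases h4 : (pvSel 4 "Adjust the complexity level or implementation steps: " errors).isEmpty <;>
  simp [List.filter, h0, h1, h2, h3, h4] <;> simp_all
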